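-- pv_equiv track=rewrite | github.com/topal-team/rockmate | rotor/models/vgg.py | changed_indices
-- ===== SOURCE A (Python) =====
-- def changed_indices(cfg, batch_norm = False):
--     removed = []
--     updated = []
--     current_index = 0
--     for v in cfg:
--         if v == 'M':
--             current_index += 1
--         else:
--             if batch_norm:
--                 removed.append(current_index + 2)
--                 current_index += 3
--             else:
--                 updated.append(current_index)
--                 removed.append(current_index + 1)
--                 current_index += 2
--     return updated, removed
-- ===== SOURCE B (Python) =====
-- def changed_indices(cfg, batch_norm=False):
--     # Pass 1: the pre-increment index (offset) at each position of cfg.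
--     step = 3 if batch_norm else 2
--     offsets = []
--     o = 0
--     for v in cfg:
--         offsets.append(o)
--         o += 1 if v == 'M' else step
--     # Pass 2: comprehensions over the non-'M' positions.
--     if batch_norm:
--         return [], [o + 2 for v, o in zip(cfg, offsets) if v != 'M']
--     return ([o for v, o in zip(cfg, offsets) if v != 'M'],
--             [o + 1 for v, o in zip(cfg, offsets) if v != 'M'])
-- ===== Notes on version B (the rewrite author's own statement) =====
-- stated objective: alternative
-- what changed: Replaces the single stateful loop with multi-way accumulator appends by a two-pass decomposition: first a prefix-sum pass computing the pre-increment offset of every cfg element, then comprehensions over zip(cfg, offsets) building updated/removed directly.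
import Mathlib
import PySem

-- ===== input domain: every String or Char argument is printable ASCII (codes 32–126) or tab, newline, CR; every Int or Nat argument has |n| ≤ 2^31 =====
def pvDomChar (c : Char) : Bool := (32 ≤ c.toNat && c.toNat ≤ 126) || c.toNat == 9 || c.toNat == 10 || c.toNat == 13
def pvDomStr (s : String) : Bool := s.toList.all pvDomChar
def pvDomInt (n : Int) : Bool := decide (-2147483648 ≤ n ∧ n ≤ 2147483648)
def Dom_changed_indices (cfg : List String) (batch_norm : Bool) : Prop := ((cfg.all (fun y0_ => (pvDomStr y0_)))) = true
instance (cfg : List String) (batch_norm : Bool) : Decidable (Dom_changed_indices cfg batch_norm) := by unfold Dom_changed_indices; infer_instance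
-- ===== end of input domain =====

-- B replaces A's single stateful loop by a two-pass decomposition (prefix-sum offsets, then comprehensions); alternative structure, same cost.


-- ===== PORT A =====
-- state = (removed, updated, current_index), exactly A's loop
def changed_indices (cfg : List String) (batch_norm : Bool) : List Int × List Int :=
  let s := cfg.foldl
    (fun (st : List Int × List Int × Int) v =>
      if v == "M" then (st.1, st.2.1, st.2.2 + 1)
      else if batch_norm then (st.1 ++ [st.2.2 + 2], st.2.1, st.2.2 + 3)
      else (st.1 ++ [st.2.2 + 1], st.2.1 ++ [st.2.2], st.2.2 + 2))
    ([], [], 0)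
  (s.2.1, s.1)

-- ===== PORT B =====
-- pass 1 of Source B: the pre-increment offset at each position
def changed_indices_alt (cfg : List String) (batch_norm : Bool) : List Int × List Int :=
  let step : Int := if batch_norm then 3 else 2
  let offsets := (cfg.foldl
    (fun (st : List Int × Int) v =>
      (st.1 ++ [st.2], st.2 + (if v == "M" then 1 else step))) ([], 0)).1
  let pairs := cfg.zip offsets
  if batch_norm then
    ([], (pairs.filter (fun p => p.1 != "M")).map (fun p => p.2 + 2))
  else
    ((pairs.filter (fun p => p.1 != "M")).map (fun p => p.2),
     (pairs.filter (fun p => p.1 != "M")).map (fun p => p.2 + 1))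

-- ===== PRECONDITION & SPEC =====
def Spec_changed_indices (cfg : List String) (batch_norm : Bool) (out : List Int × List Int) : Prop := out = changed_indices_alt cfg batch_norm
instance (cfg : List String) (batch_norm : Bool) (out : List Int × List Int) : Decidable (Spec_changed_indices cfg batch_norm out) := by unfold Spec_changed_indices; infer_instance

-- ===== CLAIM (what is proved, stated in full; the proofs are below) =====
def Claim_equal_changed_indices : Prop := ∀ (cfg : List String) (batch_norm : Bool), Dom_changed_indices cfg batch_norm → Spec_changed_indices cfg batch_norm (changed_indices cfg batch_norm)

-- ===== LEMMAS AND PROOFS =====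

-- the per-element index increment
def stepOf (bn : Bool) (v : String) : Int := if v = "M" then 1 else if bn then 3 else 2

-- pre-increment offset of each position
def offL (bn : Bool) : Int → List String → List Int
  | _, [] => []
  | c, v :: t => c :: offL bn (c + stepOf bn v) t

-- offsets of the non-'M' positions
def nmOffs (bn : Bool) : Int → List String → List Int
  | _, [] => []
  | c, v :: t => if v = "M" then nmOffs bn (c + 1) t
      else c :: nmOffs bn (c + (if bn then 3 else 2)) t

-- final index after processing cfg from c
def endIdx (bn : Bool) : Int → List String → Int
  | c, [] => c
  | c, v :: t => endIdx bn (c + stepOf bn v) t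

theorem offs_fold (bn : Bool) : ∀ (cfg : List String) (acc : List Int) (c : Int),
    (cfg.foldl
      (fun (st : List Int × Int) v =>
        (st.1 ++ [st.2], st.2 + (if v = "M" then 1 else if bn then 3 else 2))) (acc, c)).1
    = acc ++ offL bn c cfg := by
  intro cfg
  induction cfg with
  | nil => intro acc c; simp [offL]
  | cons v t ih =>
      intro acc c
      by_cases h : v = "M" <;>
        simp [offL, stepOf, h, ih]

theorem zfm (bn : Bool) (f : Int → Int) : ∀ (cfg : List String) (c : Int),
    ((cfg.zip (offL bn c cfg)).filter (fun p => p.1 != "M")).map (fun p => f p.2)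
    = (nmOffs bn c cfg).map f := by
  intro cfg
  induction cfg with
  | nil => intro c; simp [offL, nmOffs]
  | cons v t ih =>
      intro c
      by_cases h : v = "M" <;>
        simp [offL, nmOffs, stepOf, h, ih]

theorem a_fold (bn : Bool) : ∀ (cfg : List String) (r u : List Int) (c : Int),
    cfg.foldl
      (fun (st : List Int × List Int × Int) v =>
        if v = "M" then (st.1, st.2.1, st.2.2 + 1)
        else if bn then (st.1 ++ [st.2.2 + 2], st.2.1, st.2.2 + 3)
        else (st.1 ++ [st.2.2 + 1], st.2.1 ++ [st.2.2], st.2.2 + 2)) (r, u, c)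
    = (r ++ (nmOffs bn c cfg).map (fun x => x + (if bn then 2 else 1)),
       u ++ (if bn then [] else nmOffs bn c cfg),
       endIdx bn c cfg) := by
  intro cfg
  cases bn <;>
  · induction cfg with
    | nil => intro r u c; simp [nmOffs, endIdx]
    | cons v t ih =>
        intro r u c
        simp only [Bool.false_eq_true, if_true, if_false] at ih
        by_cases h : v = "M" <;>
          simp [nmOffs, endIdx, stepOf, h, ih]

-- ===== VERDICT (by name: the statement is the Claim_ definition above) =====
theorem changed_indices_spec : Claim_equal_changed_indices := by
  intro cfg bn _
  show changed_indices cfg bn = changed_indices_alt cfg bn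
  unfold changed_indices changed_indices_alt
  cases bn
  · have hA := a_fold false cfg [] [] 0
    have hO := offs_fold false cfg [] 0
    have hZ1 := zfm false (fun x => x) cfg 0
    have hZ2 := zfm false (fun x => x + 1) cfg 0
    simp at hA hO hZ1 hZ2
    simp [hA, hO, hZ1, hZ2]
  · have hA := a_fold true cfg [] [] 0
    have hO := offs_fold true cfg [] 0
    have hZ := zfm true (fun x => x + 2) cfg 0
    simp at hA hO hZ
    simp [hA, hO, hZ]
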